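-- pv_equiv track=rewrite | github.com/Priyanshu-Jain7/Quagmire1-Quagmire2 | one.py | encrypt_quagmire1
-- ===== SOURCE A (Python) =====
-- import string
--
-- def create_keyed_alphabet(keyword):
--     keyword_unique = ''.join(sorted(set(keyword), key=keyword.index))
--     remaining_letters = ''.join([ch for ch in string.ascii_uppercase if ch not in keyword_unique])
--     return keyword_unique + remaining_letters
--
-- def shift_alphabet(alphabet, shift):
--     return alphabet[shift:] + alphabet[:shift]
--
-- def encrypt_quagmire1(plaintext, key, indicator_key):
--     plaintext = plaintext.upper().replace(" ", "")
--     key_alphabet = create_keyed_alphabet(key.upper())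
--     indicator_key = indicator_key.upper()
--     period = len(indicator_key)
--     ciphertext = []
--
--     for i, char in enumerate(plaintext):
--         row = shift_alphabet(key_alphabet, string.ascii_uppercase.index(indicator_key[i % period]))
--         plaintext_index = string.ascii_uppercase.index(char)
--         ciphertext.append(row[plaintext_index])
--
--     return ''.join(ciphertext)
-- ===== SOURCE B (Python) =====
-- import string
--
-- def encrypt_quagmire1(plaintext, key, indicator_key):
--     pt = plaintext.upper().replace(" ", "")
--     if not pt:
--         return ""
--     alpha = "".join(dict.fromkeys(key.upper()))
--     alpha += "".join(c for c in string.ascii_uppercase if c not in alpha)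
--     ik = indicator_key.upper()
--     period = len(ik)
--     out = [""] * len(pt)
--     # column-wise: one substitution table per indicator letter, scattered
--     # into the output array at that letter's strided positions
--     for j, ind in enumerate(ik):
--         shift = string.ascii_uppercase.index(ind)
--         sub = {string.ascii_uppercase[p]: alpha[(shift + p) % len(alpha)]
--                for p in range(26)}
--         for pos in range(j, len(pt), period):
--             out[pos] = sub[pt[pos]]
--     return "".join(out)
-- ===== Notes on version B (the rewrite author's own statement) =====
-- stated objective: alternative
-- what changed: B replaces A's per-character loop (which rebuilds a rotated alphabet string for every character) by a column-wise pass: for each indicator letter it precomputes one substitution dictionary and scatters its outputs into a preallocated array at the strided positions j, j+period, ..., joining at the end.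
-- outside the precondition, e.g. on encrypt_quagmire1('A', 'k', 'A1'): A returns 'K', B raises ValueError
import Mathlib
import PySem

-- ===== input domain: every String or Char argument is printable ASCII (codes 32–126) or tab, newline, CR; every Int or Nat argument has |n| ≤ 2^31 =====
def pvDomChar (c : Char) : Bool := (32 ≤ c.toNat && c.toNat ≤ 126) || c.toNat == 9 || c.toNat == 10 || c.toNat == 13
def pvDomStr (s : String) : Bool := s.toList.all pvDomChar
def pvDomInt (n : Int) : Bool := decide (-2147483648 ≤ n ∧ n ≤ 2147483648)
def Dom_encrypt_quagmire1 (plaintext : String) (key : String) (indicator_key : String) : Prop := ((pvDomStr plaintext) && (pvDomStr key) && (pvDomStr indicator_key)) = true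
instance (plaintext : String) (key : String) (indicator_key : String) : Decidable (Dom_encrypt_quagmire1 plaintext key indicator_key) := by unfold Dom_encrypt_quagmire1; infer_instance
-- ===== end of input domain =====

-- B replaces A's per-character rebuilding of a rotated alphabet by a column-wise pass: one
-- substitution table per indicator letter, scattered into a preallocated output array (alternative).

-- string.ascii_uppercase
def pvUpperAZ : List Char := "ABCDEFGHIJKLMNOPQRSTUVWXYZ".toList

-- ===== PORT A =====
def pvCreateKeyedAlphabet (keyword : List Char) : List Char :=
  let keyword_unique := PySem.List.sorted (PySem.Set.ofList keyword) (fun c => List.idxOf c keyword)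
  let remaining_letters := pvUpperAZ.filter (fun ch => !(keyword_unique.contains ch))
  keyword_unique ++ remaining_letters

def pvShiftAlphabet (alphabet : List Char) (shift : Int) : List Char :=
  PySem.List.slice alphabet (some shift) none ++ PySem.List.slice alphabet none (some shift)

def encrypt_quagmire1 (plaintext : String) (key : String) (indicator_key : String) : String :=
  let pt := PySem.Chars.replace (PySem.Chars.upper plaintext.toList) [' '] []
  let key_alphabet := pvCreateKeyedAlphabet (PySem.Chars.upper key.toList)
  let ik := PySem.Chars.upper indicator_key.toList
  let period : Int := ik.length
  let ciphertext := (PySem.List.enumerate pt).foldl (fun acc ic =>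
      let row := pvShiftAlphabet key_alphabet
        ((List.idxOf (PySem.List.pyGetD ik (PySem.Int.mod ic.1 period) ' ') pvUpperAZ : Nat) : Int)
      let plaintext_index : Int := (List.idxOf ic.2 pvUpperAZ : Nat)
      acc ++ [PySem.List.pyGetD row plaintext_index ' ']) []
  String.mk ciphertext

-- ===== PORT B =====
def encrypt_quagmire1_alt (plaintext : String) (key : String) (indicator_key : String) : String :=
  let pt := PySem.Chars.replace (PySem.Chars.upper plaintext.toList) [' '] []
  if pt = [] then "" else
  let a0 := PySem.List.dedup (PySem.Chars.upper key.toList)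
  let alpha := a0 ++ pvUpperAZ.filter (fun c => !(a0.contains c))
  let ik := PySem.Chars.upper indicator_key.toList
  let period : Int := ik.length
  let out := (PySem.List.enumerate ik).foldl (fun out jind =>
      let shift : Int := ((List.idxOf jind.2 pvUpperAZ : Nat) : Int)
      let sub : PySem.Dict Char Char := (PySem.List.pyRange 0 26 1).foldl
        (fun d p => PySem.Dict.insert d (PySem.List.pyGetD pvUpperAZ p ' ')
          (PySem.List.pyGetD alpha (PySem.Int.mod (shift + p) (alpha.length : Int)) ' ')) PySem.Dict.empty
      (PySem.List.pyRange jind.1 (pt.length : Int) period).foldl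
        (fun o pos => PySem.List.pySetD o pos [PySem.Dict.getD sub (PySem.List.pyGetD pt pos ' ') ' ']) out)
    (List.replicate pt.length ([] : List Char))
  String.mk out.flatten

-- ===== PRECONDITION & SPEC =====
-- Pre_ excludes the inputs on which A raises (a plaintext character that is neither a letter nor a
-- space, or an empty indicator key with a nonempty stripped plaintext), and requires EVERY indicator
-- character to be a letter when the stripped plaintext is nonempty: that is slightly narrower than
-- A's exact domain (A never inspects indicator positions a short plaintext does not reach), and on
-- such excluded inputs A returns while B raises (see cites).
def Pre_encrypt_quagmire1 (plaintext : String) (key : String) (indicator_key : String) : Prop :=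
  (plaintext.toList.all (fun c => c == ' ' || c.isAlpha)) = true ∧
  (plaintext.toList.any (fun c => !(c == ' ')) = true →
    (indicator_key.toList.all (fun c => c.isAlpha)) = true ∧ indicator_key.toList ≠ [])
instance (plaintext : String) (key : String) (indicator_key : String) : Decidable (Pre_encrypt_quagmire1 plaintext key indicator_key) := by unfold Pre_encrypt_quagmire1; infer_instance

def pvWitness_encrypt_quagmire1 : String × String × String := ("HELLO WORLD", "Cipher3 Key!", "AbC")

def Spec_encrypt_quagmire1 (plaintext : String) (key : String) (indicator_key : String) (out : String) : Prop := out = encrypt_quagmire1_alt plaintext key indicator_key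
instance (plaintext : String) (key : String) (indicator_key : String) (out : String) : Decidable (Spec_encrypt_quagmire1 plaintext key indicator_key out) := by unfold Spec_encrypt_quagmire1; infer_instance

-- ===== CLAIM (what is proved, stated in full; the proofs are below) =====
def Claim_equal_encrypt_quagmire1 : Prop := ∀ (plaintext : String) (key : String) (indicator_key : String), Dom_encrypt_quagmire1 plaintext key indicator_key → Pre_encrypt_quagmire1 plaintext key indicator_key → Spec_encrypt_quagmire1 plaintext key indicator_key (encrypt_quagmire1 plaintext key indicator_key)

-- ===== LEMMAS AND PROOFS =====

theorem pvWitness_ok :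
    Dom_encrypt_quagmire1 pvWitness_encrypt_quagmire1.1 pvWitness_encrypt_quagmire1.2.1 pvWitness_encrypt_quagmire1.2.2 ∧
    Pre_encrypt_quagmire1 pvWitness_encrypt_quagmire1.1 pvWitness_encrypt_quagmire1.2.1 pvWitness_encrypt_quagmire1.2.2 := by
  constructor <;> decide

-- the first-occurrence dedup is already sorted by first index
theorem pvPairwise_ofList (l : List Char) :
    List.Pairwise (fun a b => List.idxOf a l < List.idxOf b l) (PySem.Set.ofList l) := by
  induction l using List.reverseRecOn with
  | nil => simp [PySem.Set.ofList, PySem.Set.empty]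
  | append_singleton l' x ih =>
    have hof : PySem.Set.ofList (l' ++ [x]) = PySem.Set.add (PySem.Set.ofList l') x := by
      simp [PySem.Set.ofList, List.foldl_append]
    rw [hof]
    have hmem : ∀ a, a ∈ PySem.Set.ofList l' → a ∈ l' := fun a ha => (PySem.Set.mem_ofList l' a).mp ha
    have hlift : List.Pairwise (fun a b => List.idxOf a (l' ++ [x]) < List.idxOf b (l' ++ [x])) (PySem.Set.ofList l') := by
      refine ih.imp_of_mem ?_
      intro a b ha hb hab
      rw [List.idxOf_append, List.idxOf_append, if_pos (hmem a ha), if_pos (hmem b hb)]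
      exact hab
    unfold PySem.Set.add
    by_cases hx : x ∈ PySem.Set.ofList l'
    · rw [if_pos (by simpa using hx)]
      exact hlift
    · rw [if_neg (by simpa using hx)]
      have hxl : x ∉ l' := fun h => hx ((PySem.Set.mem_ofList l' x).mpr h)
      refine List.pairwise_append.mpr ⟨hlift, List.pairwise_singleton _ _, ?_⟩
      intro a ha b hb
      rcases List.mem_singleton.mp hb with rfl
      rw [List.idxOf_append, List.idxOf_append, if_pos (hmem a ha), if_neg hxl]
      have := List.idxOf_lt_length_of_mem (hmem a ha)
      simp
      omega

-- A's keyed alphabet is B's dedup-based one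
theorem pvAlpha_eq (kw : List Char) :
    pvCreateKeyedAlphabet kw =
      PySem.List.dedup kw ++ pvUpperAZ.filter (fun c => !((PySem.List.dedup kw).contains c)) := by
  have h : PySem.List.sorted (PySem.Set.ofList kw) (fun c => List.idxOf c kw) = PySem.Set.ofList kw :=
    PySem.List.sorted_eq_of_perm_of_pairwise_lt _ _ _ (List.Perm.refl _) (pvPairwise_ofList kw)
  simp only [pvCreateKeyedAlphabet, h]
  rfl

-- A's rotation indexed = modular indexing
theorem pvRot (l : List Char) (s p : Nat) (hs : s ≤ l.length) (hp : p < l.length) (d : Char) :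
    PySem.List.pyGetD (pvShiftAlphabet l (s : Int)) (p : Int) d
      = PySem.List.pyGetD l (PySem.Int.mod ((s : Int) + (p : Int)) (l.length : Int)) d := by
  have hrow : pvShiftAlphabet l (s : Int) = l.drop s ++ l.take s := by
    rw [pvShiftAlphabet, PySem.List.slice_from l (Int.natCast_nonneg s),
      PySem.List.slice_to l (Int.natCast_nonneg s), Int.toNat_natCast]
  have hlen : (l.drop s ++ l.take s).length = l.length := by
    simp; omega
  have hmod : PySem.Int.mod ((s : Int) + (p : Int)) (l.length : Int) = (((s + p) % l.length : Nat) : Int) := by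
    push_cast
    exact_mod_cast PySem.Int.mod_natCast (s + p) l.length
  rw [hrow, hmod]
  have hm : (s + p) % l.length < l.length := Nat.mod_lt _ (by omega)
  rw [PySem.List.pyGetD_eq_getElem _ d (Int.natCast_nonneg p) (by rw [hlen]; exact_mod_cast hp),
      PySem.List.pyGetD_eq_getElem _ d (Int.natCast_nonneg _) (by exact_mod_cast hm)]
  simp only [Int.toNat_natCast]
  by_cases hcase : p < l.length - s
  · rw [List.getElem_append_left (by simpa using hcase)]
    rw [List.getElem_drop]
    have : (s + p) % l.length = s + p := Nat.mod_eq_of_lt (by omega)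
    simp [this]
  · rw [List.getElem_append_right (by simp; omega)]
    rw [List.getElem_take]
    have h2 : (s + p) % l.length = s + p - l.length := by
      rw [Nat.mod_eq_sub_mod (by omega)]
      exact Nat.mod_eq_of_lt (by omega)
    simp only [List.length_drop, h2]
    congr 1
    omega

theorem pvReplace_go (fuel : Nat) : ∀ (l acc : List Char), l.length ≤ fuel →
    PySem.Chars.replace.go [' '] [] fuel l acc = acc.reverse ++ l.filter (fun c => !(c == ' ')) := by
  induction fuel with
  | zero =>
    intro l acc h
    have : l = [] := List.length_eq_zero_iff.mp (Nat.le_zero.mp h)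
    subst this
    rw [PySem.Chars.replace.go]; simp
  | succ f ih =>
    intro l acc h
    cases l with
    | nil =>
      rw [PySem.Chars.replace.go] <;> simp
    | cons c t =>
      by_cases hc : c = ' '
      · subst hc
        rw [PySem.Chars.replace.go]
        rw [if_pos (by simp [List.isPrefixOf])]
        simp only [List.reverse_nil, List.nil_append, List.length_cons, List.length_nil,
          List.drop_succ_cons, List.drop_zero]
        rw [ih t acc (by simpa using h)]
        simp
      · rw [PySem.Chars.replace.go]
        rw [if_neg (by simp [List.isPrefixOf]; exact fun he => absurd he.symm hc)]
        rw [ih t (c :: acc) (by simpa using h)]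
        simp [hc]

theorem pvReplace_filter (l : List Char) :
    PySem.Chars.replace l [' '] [] = l.filter (fun c => !(c == ' ')) := by
  rw [PySem.Chars.replace]
  rw [if_neg (by decide)]
  simpa using pvReplace_go l.length l [] le_rfl

theorem pvUpperChar_mem (c : Char) (h : c.isAlpha = true) :
    PySem.Chars.upperChar c ∈ pvUpperAZ := by
  have hb : (65 ≤ c.toNat ∧ c.toNat ≤ 90) ∨ (97 ≤ c.toNat ∧ c.toNat ≤ 122) := by
    simp only [Char.isAlpha, Char.isUpper, Char.isLower, Bool.or_eq_true, Bool.and_eq_true,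
      decide_eq_true_eq] at h
    rcases h with ⟨h1, h2⟩ | ⟨h1, h2⟩
    · left; exact ⟨h1, h2⟩
    · right; exact ⟨h1, h2⟩
  obtain ⟨n, hn, hlo, hhi⟩ : ∃ n, c.toNat = n ∧ 65 ≤ n ∧ n ≤ 122 :=
    ⟨c.toNat, rfl, by omega, by omega⟩
  have hc : c = Char.ofNat n := by rw [← hn, Char.ofNat_toNat]
  have hb' : (65 ≤ n ∧ n ≤ 90) ∨ (97 ≤ n ∧ n ≤ 122) := by rw [hn] at hb; exact hb
  subst hc
  interval_cases n <;> first | decide | (exfalso; omega)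

theorem pvAZ_subset_len (a0 : List Char) :
    26 ≤ (a0 ++ pvUpperAZ.filter (fun c => !(a0.contains c))).length := by
  have hsub : pvUpperAZ ⊆ a0 ++ pvUpperAZ.filter (fun c => !(a0.contains c)) := by
    intro c hc
    by_cases h : c ∈ a0
    · exact List.mem_append_left _ h
    · exact List.mem_append_right _ (List.mem_filter.mpr ⟨hc, by simpa using h⟩)
  have hnd : pvUpperAZ.Nodup := by decide
  calc (26 : Nat) = pvUpperAZ.length := by decide
    _ = pvUpperAZ.toFinset.card := (List.toFinset_card_of_nodup hnd).symm
    _ ≤ (a0 ++ pvUpperAZ.filter (fun c => !(a0.contains c))).toFinset.card := by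
        refine Finset.card_le_card ?_
        intro c hc
        simp only [List.mem_toFinset] at hc ⊢
        exact hsub hc
    _ ≤ _ := List.toFinset_card_le _

theorem pvFoldSet (v : Int → List Char) :
    ∀ (ps : List Int) (o : List (List Char)), (∀ p ∈ ps, 0 ≤ p) →
    (ps.foldl (fun o pos => PySem.List.pySetD o pos (v pos)) o).length = o.length ∧
    ∀ q : Nat, (ps.foldl (fun o pos => PySem.List.pySetD o pos (v pos)) o)[q]? =
      if (q : Int) ∈ ps ∧ q < o.length then some (v q) else o[q]? := by
  intro ps
  induction ps with
  | nil => intro o _; simp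
  | cons p ps ih =>
    intro o hpos
    have hp0 : 0 ≤ p := hpos p (List.mem_cons_self)
    have hset : PySem.List.pySetD o p (v p) = o.set p.toNat (v p) :=
      PySem.List.pySetD_of_nonneg o (v p) hp0
    obtain ⟨ihlen, ihget⟩ := ih (PySem.List.pySetD o p (v p))
      (fun x hx => hpos x (List.mem_cons_of_mem _ hx))
    constructor
    · simpa [PySem.List.length_pySetD] using ihlen
    · intro q
      rw [List.foldl_cons, ihget q]
      rw [hset, List.getElem?_set]
      simp only [List.length_set, List.mem_cons]
      by_cases hmem : (q : Int) ∈ ps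
      · by_cases hlt : q < o.length
        · simp [hmem, hlt]
        · simp [hmem, hlt]
          intro h; omega
      · by_cases hq : p.toNat = q
        · have hpq : p = (q : Int) := by omega
          by_cases hlt : q < o.length
          · simp [hmem, hlt, hpq]
          · simp [hmem, hlt, hpq]
        · simp [hmem, hq]
          intro h _
          omega

theorem pvSubAux (alpha : List Char) (shift : Int) (c : Char) (k : Nat)
    (hk : k < 26) (hAZk : pvUpperAZ[k]'(by simpa [pvUpperAZ] using hk) = c) :
    ∀ (m a : Nat), a + m = 26 → ∀ (d0 : PySem.Dict Char Char),
    PySem.Dict.getD ((PySem.List.pyRange (a : Int) 26 1).foldl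
        (fun d p => PySem.Dict.insert d (PySem.List.pyGetD pvUpperAZ p ' ')
          (PySem.List.pyGetD alpha (PySem.Int.mod (shift + p) (alpha.length : Int)) ' ')) d0) c ' '
      = if a ≤ k
        then PySem.List.pyGetD alpha (PySem.Int.mod (shift + (k : Int)) (alpha.length : Int)) ' '
        else PySem.Dict.getD d0 c ' ' := by
  intro m
  induction m with
  | zero =>
    intro a ha d0
    have : (26 : Int) ≤ (a : Int) := by omega
    rw [PySem.List.pyRange_one_eq_nil this]
    simp only [List.foldl_nil]
    rw [if_neg (by omega)]
  | succ m ih =>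
    intro a ha d0
    have hacast : ((a : Int) + 1) = ((a + 1 : Nat) : Int) := by push_cast; ring
    rw [PySem.List.pyRange_one_cons (by omega : (a : Int) < 26), List.foldl_cons, hacast,
      ih (a + 1) (by omega)]
    have hget : PySem.List.pyGetD pvUpperAZ (a : Int) ' ' = pvUpperAZ[a]'(by simpa [pvUpperAZ] using (by omega : a < 26)) := by
      rw [PySem.List.pyGetD_natCast]
      exact List.getD_eq_getElem _ _ _
    by_cases hcase : a + 1 ≤ k
    · rw [if_pos hcase, if_pos (by omega)]
    · by_cases heq : a = k
      · subst heq
        rw [if_neg hcase, if_pos le_rfl, hget]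
        rw [hAZk, PySem.Dict.getD_insert_self]
      · rw [if_neg hcase, if_neg (by omega), hget]
        refine PySem.Dict.getD_insert_of_ne _ _ _ ?_
        rw [← hAZk]
        intro h
        have hnd : pvUpperAZ.Nodup := by decide
        exact absurd (List.Nodup.getElem_inj_iff hnd |>.mp h) (by omega)

theorem pvSubLookup (alpha : List Char) (shift : Int) (c : Char) (hc : c ∈ pvUpperAZ) :
    PySem.Dict.getD ((PySem.List.pyRange 0 26 1).foldl
        (fun d p => PySem.Dict.insert d (PySem.List.pyGetD pvUpperAZ p ' ')
          (PySem.List.pyGetD alpha (PySem.Int.mod (shift + p) (alpha.length : Int)) ' '))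
        PySem.Dict.empty) c ' '
      = PySem.List.pyGetD alpha
          (PySem.Int.mod (shift + ((List.idxOf c pvUpperAZ : Nat) : Int)) (alpha.length : Int)) ' ' := by
  have hk : List.idxOf c pvUpperAZ < 26 := by
    simpa [pvUpperAZ] using List.idxOf_lt_length_of_mem hc
  have hAZk : pvUpperAZ[List.idxOf c pvUpperAZ]'(by simpa [pvUpperAZ] using hk) = c :=
    List.getElem_idxOf _
  have := pvSubAux alpha shift c (List.idxOf c pvUpperAZ) hk hAZk 26 0 rfl PySem.Dict.empty
  simpa using this

theorem pvOuter (n PN : Nat) (W : Char → Int → List Char) :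
    ∀ (tl : List Char) (s : Nat) (o : List (List Char)), o.length = n → s + tl.length ≤ PN →
    ((PySem.List.enumerate tl (s : Int)).foldl (fun o jind =>
        (PySem.List.pyRange jind.1 (n : Int) (PN : Int)).foldl
          (fun o pos => PySem.List.pySetD o pos (W jind.2 pos)) o) o).length = n ∧
    ∀ q : Nat, q < n →
      ((PySem.List.enumerate tl (s : Int)).foldl (fun o jind =>
          (PySem.List.pyRange jind.1 (n : Int) (PN : Int)).foldl
            (fun o pos => PySem.List.pySetD o pos (W jind.2 pos)) o) o)[q]? =
        if s ≤ q % PN ∧ q % PN < s + tl.length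
        then some (W (tl.getD (q % PN - s) ' ') (q : Int)) else o[q]? := by
  intro tl
  induction tl with
  | nil =>
    intro s o hlen _
    simp only [PySem.List.enumerate_nil, List.foldl_nil]
    refine ⟨hlen, fun q _ => ?_⟩
    rw [if_neg (by simp)]
  | cons c tl ih =>
    intro s o hlen hb
    have hPN : 0 < PN := by simp at hb; omega
    have hsP : s < PN := by simp at hb; omega
    rw [PySem.List.enumerate_cons, List.foldl_cons]
    -- the inner fold for column s
    have hpos : ∀ p ∈ PySem.List.pyRange (s : Int) (n : Int) (PN : Int), 0 ≤ p := by
      intro p hp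
      have := (PySem.List.mem_pyRange_iff_of_pos (by exact_mod_cast hPN) p).mp hp
      omega
    obtain ⟨flen, fget⟩ := pvFoldSet (W c) (PySem.List.pyRange (s : Int) (n : Int) (PN : Int)) o hpos
    set o' := (PySem.List.pyRange (s : Int) (n : Int) (PN : Int)).foldl
        (fun o pos => PySem.List.pySetD o pos (W c pos)) o with ho'
    have hlen' : o'.length = n := by rw [flen, hlen]
    have hcast : (s : Int) + 1 = ((s + 1 : Nat) : Int) := by push_cast; ring
    rw [hcast]
    obtain ⟨glen, gget⟩ := ih (s + 1) o' hlen' (by simp at hb ⊢; omega)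
    refine ⟨glen, fun q hq => ?_⟩
    rw [gget q hq]
    have hm : q % PN < PN := Nat.mod_lt _ hPN
    by_cases h1 : s + 1 ≤ q % PN ∧ q % PN < s + 1 + tl.length
    · rw [if_pos h1, if_pos (by simp; omega)]
      have : q % PN - s = (q % PN - (s + 1)) + 1 := by omega
      rw [this, List.getD_cons_succ]
    · rw [if_neg h1]
      by_cases h2 : q % PN = s
      · -- this column writes q
        rw [fget q, if_pos ?_, if_pos (by simp; omega)]
        · have : q % PN - s = 0 := by omega
          rw [this, List.getD_cons_zero]
        · have hle : s ≤ q := by rw [← h2]; exact Nat.mod_le _ _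
          refine ⟨?_, by omega⟩
          rw [PySem.List.mem_pyRange_iff_of_pos (by exact_mod_cast hPN)]
          refine ⟨by exact_mod_cast hle, by exact_mod_cast hq, ?_⟩
          have hq2 : q = PN * (q / PN) + s := by
            conv_lhs => rw [← Nat.div_add_mod q PN, h2]
          have hq3 : (q : Int) = (PN : Int) * ((q / PN : Nat) : Int) + (s : Int) := by
            exact_mod_cast hq2
          exact ⟨((q / PN : Nat) : Int), by rw [hq3]; ring⟩
      · -- q's column is elsewhere
        rw [if_neg (by simp; omega), fget q, if_neg ?_]
        rintro ⟨hmem, -⟩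
        rw [PySem.List.mem_pyRange_iff_of_pos (by exact_mod_cast hPN)] at hmem
        obtain ⟨hsq, -, d, hd⟩ := hmem
        have hdnn : 0 ≤ d := by nlinarith [hd, hsq]
        have hdq : q = s + PN * d.toNat := by
          have h3 : (q : Int) = (s : Int) + (PN : Int) * d := by linarith
          rw [← Int.toNat_of_nonneg hdnn] at h3
          exact_mod_cast h3
        have : q % PN = s := by
          rw [hdq, Nat.add_mul_mod_self_left]
          exact Nat.mod_eq_of_lt hsP
        exact h2 this

-- flatten of singleton lists
theorem pvFlattenSingleton {α β : Type} (l : List α) (f : α → β) :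
    (l.map (fun x => [f x])).flatten = l.map f := by
  induction l with
  | nil => rfl
  | cons x t ih => simp [ih]

-- ===== VERDICT (by name: the statement is the Claim_ definition above) =====
set_option maxHeartbeats 1000000 in
theorem encrypt_quagmire1_spec : Claim_equal_encrypt_quagmire1 := by
  intro plaintext key indicator_key _hdom hpre
  obtain ⟨hpt, himp⟩ := hpre
  unfold Spec_encrypt_quagmire1
  simp only [encrypt_quagmire1, encrypt_quagmire1_alt, pvAlpha_eq,
    PySem.List.foldl_append_singleton_eq_map, List.nil_append]
  set pt := PySem.Chars.replace (PySem.Chars.upper plaintext.toList) [' '] [] with hptdef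
  by_cases hpt0 : pt = []
  · rw [if_pos hpt0, hpt0]
    simp only [PySem.List.enumerate_nil, List.map_nil]
    decide
  · rw [if_neg hpt0]
    -- the stripped plaintext is nonempty, so the indicator key is all-letters and nonempty
    have hany : (plaintext.toList.any fun c => !c == ' ') = true := by
      obtain ⟨c, hc⟩ := List.exists_mem_of_ne_nil pt hpt0
      rw [hptdef, pvReplace_filter] at hc
      obtain ⟨hcu, hcs⟩ := List.mem_filter.mp hc
      obtain ⟨o, ho, hoc⟩ := List.mem_map.mp hcu
      refine List.any_eq_true.mpr ⟨o, ho, ?_⟩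
      simp only [Bool.not_eq_eq_eq_not, Bool.not_true, beq_eq_false_iff_ne, ne_eq]
      rintro rfl
      rw [show PySem.Chars.upperChar ' ' = ' ' from by decide] at hoc
      simp [← hoc] at hcs
    obtain ⟨hik, hikne⟩ := himp hany
    set ik := PySem.Chars.upper indicator_key.toList with hikdef
    have hPN : 0 < ik.length := by
      rw [hikdef]
      simp only [PySem.Chars.upper, List.length_map]
      exact List.length_pos_of_ne_nil hikne
    have hikAZ : ∀ (m : Nat) (hm : m < ik.length), ik[m] ∈ pvUpperAZ := by
      intro m hm
      have hmem : ik[m] ∈ ik := List.getElem_mem hm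
      obtain ⟨x, hxeq⟩ : ∃ x, ik[m] = x := ⟨_, rfl⟩
      rw [hxeq] at hmem ⊢
      rw [hikdef] at hmem
      obtain ⟨o, ho, hoc⟩ := List.mem_map.mp hmem
      exact hoc ▸ pvUpperChar_mem o (List.all_eq_true.mp hik o ho)
    have hptAZ : ∀ (q : Nat) (hq : q < pt.length), pt[q] ∈ pvUpperAZ := by
      intro q hq
      have hmem : pt[q] ∈ pt := List.getElem_mem hq
      obtain ⟨x, hxeq⟩ : ∃ x, pt[q] = x := ⟨_, rfl⟩
      rw [hxeq] at hmem ⊢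
      rw [hptdef, pvReplace_filter] at hmem
      obtain ⟨hcu, hcs⟩ := List.mem_filter.mp hmem
      obtain ⟨o, ho, hoc⟩ := List.mem_map.mp hcu
      have hoalpha : o.isAlpha = true := by
        have := List.all_eq_true.mp hpt o ho
        simp only [Bool.or_eq_true, beq_iff_eq] at this
        rcases this with h | h
        · exfalso; subst h
          rw [show PySem.Chars.upperChar ' ' = ' ' from by decide] at hoc
          simp [← hoc] at hcs
        · exact h
      exact hoc ▸ pvUpperChar_mem o hoalpha
    set a0 := PySem.List.dedup (PySem.Chars.upper key.toList) with ha0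
    set alpha := a0 ++ pvUpperAZ.filter (fun c => !(a0.contains c)) with halpha
    have hL : 26 ≤ alpha.length := pvAZ_subset_len a0
    -- characterize B's output array
    obtain ⟨houtlen, houtget⟩ := pvOuter pt.length ik.length
      (fun c' pos => [PySem.Dict.getD ((PySem.List.pyRange 0 26 1).foldl
          (fun d p => PySem.Dict.insert d (PySem.List.pyGetD pvUpperAZ p ' ')
            (PySem.List.pyGetD alpha
              (PySem.Int.mod (((List.idxOf c' pvUpperAZ : Nat) : Int) + p) (alpha.length : Int)) ' '))
          PySem.Dict.empty) (PySem.List.pyGetD pt pos ' ') ' '])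
      ik 0 (List.replicate pt.length ([] : List Char)) (by simp) (by simp)
    simp only [Nat.cast_zero, zero_add, Nat.sub_zero, List.getElem?_replicate] at houtget
    simp only [Nat.cast_zero] at houtlen
    congr 1
    rw [show ((PySem.List.enumerate ik 0).foldl (fun out jind =>
        (PySem.List.pyRange jind.1 (pt.length : Int) (ik.length : Int)).foldl
          (fun o pos => PySem.List.pySetD o pos
            [PySem.Dict.getD ((PySem.List.pyRange 0 26 1).foldl
              (fun d p => PySem.Dict.insert d (PySem.List.pyGetD pvUpperAZ p ' ')
                (PySem.List.pyGetD alpha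
                  (PySem.Int.mod (((List.idxOf jind.2 pvUpperAZ : Nat) : Int) + p) (alpha.length : Int)) ' '))
              PySem.Dict.empty) (PySem.List.pyGetD pt pos ' ') ' ']) out)
        (List.replicate pt.length ([] : List Char)))
      = (List.range pt.length).map (fun q =>
          [PySem.Dict.getD ((PySem.List.pyRange 0 26 1).foldl
            (fun d p => PySem.Dict.insert d (PySem.List.pyGetD pvUpperAZ p ' ')
              (PySem.List.pyGetD alpha
                (PySem.Int.mod (((List.idxOf (ik.getD (q % ik.length) ' ') pvUpperAZ : Nat) : Int) + p) (alpha.length : Int)) ' '))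
            PySem.Dict.empty) (PySem.List.pyGetD pt (q : Int) ' ') ' ']) from ?_]
    · rw [pvFlattenSingleton]
      apply List.ext_getElem?
      intro q
      rw [List.getElem?_map, List.getElem?_map, PySem.List.getElem?_enumerate]
      by_cases hq : q < pt.length
      · rw [List.getElem?_eq_getElem hq, List.getElem?_range hq]
        simp only [Option.map_some, Option.some_inj]
        have hm : q % ik.length < ik.length := Nat.mod_lt q hPN
        have h0q : PySem.Int.mod (0 + (q : Int)) ((ik.length : Nat) : Int) = ((q % ik.length : Nat) : Int) := by
          rw [zero_add]
          exact PySem.Int.mod_natCast q ik.length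
        have hikget : PySem.List.pyGetD ik ((q % ik.length : Nat) : Int) ' ' = ik[q % ik.length] := by
          rw [PySem.List.pyGetD_natCast]
          exact List.getD_eq_getElem _ _ hm
        have hikget2 : ik.getD (q % ik.length) ' ' = ik[q % ik.length] :=
          List.getD_eq_getElem _ _ hm
        have hptget : PySem.List.pyGetD pt ((q : Nat) : Int) ' ' = pt[q] := by
          rw [PySem.List.pyGetD_natCast]
          exact List.getD_eq_getElem _ _ hq
        simp only [h0q, hikget, hikget2, hptget]
        have hs : List.idxOf ik[q % ik.length] pvUpperAZ < 26 := by
          simpa [pvUpperAZ] using List.idxOf_lt_length_of_mem (hikAZ _ hm)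
        have hp : List.idxOf pt[q] pvUpperAZ < 26 := by
          simpa [pvUpperAZ] using List.idxOf_lt_length_of_mem (hptAZ q hq)
        rw [pvRot alpha _ _ (by omega) (by omega),
          pvSubLookup alpha _ _ (hptAZ q hq)]
      · rw [List.getElem?_eq_none (show pt.length ≤ q by omega),
          List.getElem?_eq_none (show (List.range pt.length).length ≤ q by simp; omega)]
        simp
    · -- the scatter fold is the range map
      apply List.ext_getElem?
      intro q
      by_cases hq : q < pt.length
      · rw [houtget q hq]
        rw [if_pos ⟨Nat.zero_le _, by simpa using Nat.mod_lt q hPN⟩]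
        rw [List.getElem?_map, List.getElem?_range hq]
        simp only [Option.map_some]
      · have h1 : (List.range pt.length).length ≤ q := by simpa using Nat.le_of_not_lt hq
        rw [List.getElem?_eq_none (by rw [houtlen]; omega),
          List.getElem?_eq_none (by simpa using h1)]
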